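-- pv_equiv track=rewrite | github.com/egementunca/identity-factory-api | scripts/scan_reducible_circuits.py | has_reducible_pairs
-- ===== SOURCE A (Python) =====
-- def has_reducible_pairs(gates_text: str) -> bool:
--     """Check if circuit has consecutive identical gates (same target and controls).
--
--     Such circuits are "reducible" because G·G = I for these reversible gates.
--     """
--     if not gates_text:
--         return False
--
--     gates = gates_text.split(";")
--     prev_gate = None
--
--     for gate_str in gates:
--         if not gate_str:
--             continue
--
--         # Normalize gate representation for comparison
--         # Format: "target:ctrl1,ctrl2" - normalize by sorting controls
--         try:
--             parts = gate_str.split(":")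
--             target = parts[0]
--             controls = sorted(parts[1].split(",")) if len(parts) > 1 and parts[1] else []
--             normalized = f"{target}:{','.join(controls)}"
--
--             if prev_gate is not None and normalized == prev_gate:
--                 return True  # Found consecutive identical gates
--
--             prev_gate = normalized
--         except (ValueError, IndexError):
--             continue
--
--     return False
-- ===== SOURCE B (Python) =====
-- def _parse(seg: str):
--     """Split a gate segment into (target, controls-as-written); no sorting."""
--     parts = seg.split(":")
--     controls = parts[1].split(",") if len(parts) > 1 and parts[1] else []
--     return parts[0], controls
--
--
-- def _same_gate(g, h) -> bool:
--     """Gate equality: same target and same multiset of controls, by counting."""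
--     t1, c1 = g
--     t2, c2 = h
--     return t1 == t2 and len(c1) == len(c2) and all(c1.count(x) == c2.count(x) for x in c1)
--
--
-- def has_reducible_pairs(gates_text: str) -> bool:
--     gates = [_parse(seg) for seg in gates_text.split(";") if seg]
--     return any(_same_gate(g, h) for g, h in zip(gates, gates[1:]))
-- ===== Notes on version B (the rewrite author's own statement) =====
-- stated objective: alternative
-- what changed: B never normalizes: where A builds a canonical string per gate by sorting the controls and re-joining them after the target, and compares adjacent normalized strings, B parses each segment once into a pair of the target and the controls as written and decides adjacent-gate identity by multiset comparison via counting (equal lengths and equal element counts), with no sort, no string re-assembly, no prev-gate accumulator and no dead try/except.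
import Mathlib
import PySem

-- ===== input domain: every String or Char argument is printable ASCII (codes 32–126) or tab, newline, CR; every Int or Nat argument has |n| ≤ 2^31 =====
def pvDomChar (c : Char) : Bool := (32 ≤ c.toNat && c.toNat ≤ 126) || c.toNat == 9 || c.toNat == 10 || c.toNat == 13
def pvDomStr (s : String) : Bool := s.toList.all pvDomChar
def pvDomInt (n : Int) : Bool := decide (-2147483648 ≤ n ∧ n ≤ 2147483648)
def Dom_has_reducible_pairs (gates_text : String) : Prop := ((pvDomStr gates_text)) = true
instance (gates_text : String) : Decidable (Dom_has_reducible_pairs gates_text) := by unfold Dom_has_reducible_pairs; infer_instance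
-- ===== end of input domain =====

-- B decides adjacent-gate identity by multiset comparison of the raw controls (counting),
-- with no sorting and no normalized-string building; return values proved equal on all inputs.

-- ===== PORT A =====
-- s.split(sep): the separators here are the nonempty literals ";", ":" and ",",
-- on which PySem.Str.split? is always `some`; getD [] is unreachable.
def pvSplit (s : String) (sep : String) : List String := (PySem.Str.split? s sep).getD []

-- A's gate normalization: "target:ctrl1,ctrl2" with controls sorted.
-- parts[0]/parts[1] are ported with pyGetD: str.split never returns an empty list so
-- parts[0] cannot raise, and parts[1] is only read under the len(parts) > 1 guard.
def pvNorm (gate_str : String) : String :=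
  let parts := pvSplit gate_str ":"
  let target := PySem.List.pyGetD parts 0 ""
  let controls :=
    if parts.length > 1 ∧ PySem.List.pyGetD parts 1 "" ≠ "" then
      PySem.List.sorted (pvSplit (PySem.List.pyGetD parts 1 "") ",") (fun x => x)
    else []
  target ++ ":" ++ PySem.Str.join "," controls

-- A's for-loop over the segments, carrying prev_gate and returning early on a match.
-- The try/except in A is dead (nothing in the body raises ValueError/IndexError).
def pvLoopA : List String → Option String → Bool
  | [], _ => false
  | gate_str :: rest, prev_gate =>
    if gate_str = "" then pvLoopA rest prev_gate
    else
      let normalized := pvNorm gate_str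
      if prev_gate ≠ none ∧ some normalized = prev_gate then true
      else pvLoopA rest (some normalized)

def has_reducible_pairs (gates_text : String) : Bool :=
  if gates_text = "" then false
  else pvLoopA (pvSplit gates_text ";") none

-- ===== PORT B =====
-- Source B's _parse: (target, controls as written) — no sorting, no re-assembled string.
def pvParse (gate_str : String) : String × List String :=
  let parts := pvSplit gate_str ":"
  let controls :=
    if parts.length > 1 ∧ PySem.List.pyGetD parts 1 "" ≠ "" then
      pvSplit (PySem.List.pyGetD parts 1 "") ","
    else []
  (PySem.List.pyGetD parts 0 "", controls)

-- Source B's _same_gate: same target and same multiset of controls, by counting.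
def pvSameGate (g h : String × List String) : Bool :=
  g.1 == h.1 && (g.2.length == h.2.length &&
    g.2.all (fun x => PySem.List.count g.2 x == PySem.List.count h.2 x))

def has_reducible_pairs_alt (gates_text : String) : Bool :=
  let gates := ((pvSplit gates_text ";").filter (fun seg => seg != "")).map pvParse
  (gates.zip (gates.drop 1)).any (fun p => pvSameGate p.1 p.2)

-- ===== PRECONDITION & SPEC =====
def Spec_has_reducible_pairs (gates_text : String) (out : Bool) : Prop := out = has_reducible_pairs_alt gates_text
instance (gates_text : String) (out : Bool) : Decidable (Spec_has_reducible_pairs gates_text out) := by unfold Spec_has_reducible_pairs; infer_instance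

-- ===== CLAIM (what is proved, stated in full; the proofs are below) =====
def Claim_equal_has_reducible_pairs : Prop := ∀ (gates_text : String), Dom_has_reducible_pairs gates_text → Spec_has_reducible_pairs gates_text (has_reducible_pairs gates_text)

-- ===== LEMMAS AND PROOFS =====

-- --- splitting on a single separator character, structurally ---
def pvSplitCh (c : Char) : List Char → List Char → List (List Char)
  | [], cur => [cur.reverse]
  | a :: rest, cur => if a = c then cur.reverse :: pvSplitCh c rest [] else pvSplitCh c rest (a :: cur)

theorem pvSplitOn_go_eq (c : Char) : ∀ (l : List Char) (fuel : Nat), l.length < fuel →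
    ∀ (cur : List Char) (acc : List (List Char)),
    PySem.Chars.splitOn.go [c] fuel l cur acc = acc.reverse ++ pvSplitCh c l cur := by
  intro l
  induction l with
  | nil =>
    intro fuel h cur acc
    cases fuel with
    | zero => omega
    | succ f => rw [PySem.Chars.splitOn.go.eq_def]; simp [pvSplitCh]
  | cons a rest ih =>
    intro fuel h cur acc
    cases fuel with
    | zero => omega
    | succ f =>
      rw [PySem.Chars.splitOn.go.eq_def]
      simp only [List.isPrefixOf, Bool.and_true]
      by_cases hac : c = a
      · subst hac
        simp only [beq_self_eq_true, if_pos, List.length_cons, List.length_nil,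
          Nat.zero_add, List.drop_succ_cons, List.drop_zero]
        rw [ih f (by simpa using Nat.lt_of_succ_lt_succ h) [] (cur.reverse :: acc)]
        simp [pvSplitCh]
      · have : (c == a) = false := by simpa using hac
        simp only [this, Bool.false_eq_true, ite_false]
        rw [ih f (by simpa using Nat.lt_of_succ_lt_succ h) (a :: cur) acc]
        have hstep : pvSplitCh c (a :: rest) cur = pvSplitCh c rest (a :: cur) := by
          rw [pvSplitCh, if_neg (fun hh : a = c => hac hh.symm)]
        rw [hstep]

theorem pvSplitOn_eq (c : Char) (l : List Char) :
    PySem.Chars.splitOn l [c] = pvSplitCh c l [] := by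
  unfold PySem.Chars.splitOn
  rw [pvSplitOn_go_eq c l (l.length + 1) (by omega) [] []]
  rfl

theorem pvSplit_eq (s sep : String) (c : Char) (hc : sep.toList = [c]) :
    pvSplit s sep = (pvSplitCh c s.toList []).map String.ofList := by
  simp [pvSplit, PySem.Str.split?, PySem.Chars.split?, hc, pvSplitOn_eq]

theorem pvSplitCh_ne_nil (c : Char) : ∀ (l cur : List Char), pvSplitCh c l cur ≠ [] := by
  intro l
  induction l with
  | nil => intro cur; simp [pvSplitCh]
  | cons a rest ih =>
    intro cur
    by_cases hac : a = c <;> simp [pvSplitCh, hac, ih]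

theorem pvSplitCh_not_mem (c : Char) : ∀ (l cur : List Char), c ∉ cur →
    ∀ p ∈ pvSplitCh c l cur, c ∉ p := by
  intro l
  induction l with
  | nil =>
    intro cur hcur p hp
    simp [pvSplitCh] at hp
    simpa [hp] using hcur
  | cons a rest ih =>
    intro cur hcur p hp
    by_cases hac : a = c
    · rw [pvSplitCh, if_pos hac] at hp
      rcases List.mem_cons.mp hp with h | h
      · simpa [h] using hcur
      · exact ih [] (by simp) p h
    · rw [pvSplitCh, if_neg hac] at hp
      exact ih (a :: cur) (by
        simp only [List.mem_cons, not_or]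
        exact ⟨fun hh => hac hh.symm, hcur⟩) p hp

-- Chars.join on a one-character separator, unfolded
theorem pvJoin_nil (c : Char) : PySem.Chars.join [c] [] = [] := by
  simp [PySem.Chars.join, List.intercalate]

theorem pvJoin_singleton (c : Char) (p : List Char) : PySem.Chars.join [c] [p] = p := by
  simp [PySem.Chars.join, List.intercalate]

theorem pvJoin_cons_cons (c : Char) (p q : List Char) (r : List (List Char)) :
    PySem.Chars.join [c] (p :: q :: r) = p ++ c :: PySem.Chars.join [c] (q :: r) := by
  simp [PySem.Chars.join, List.intercalate, List.intersperse]

theorem pvSplitCh_join (c : Char) : ∀ (l cur : List Char),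
    PySem.Chars.join [c] (pvSplitCh c l cur) = cur.reverse ++ l := by
  intro l
  induction l with
  | nil => intro cur; simp [pvSplitCh, PySem.Chars.join, List.intercalate]
  | cons a rest ih =>
    intro cur
    by_cases hac : a = c
    · rw [pvSplitCh, if_pos hac]
      rcases heq : pvSplitCh c rest [] with _ | ⟨q, r⟩
      · exact absurd heq (pvSplitCh_ne_nil c rest [])
      · have h2 := ih []
        rw [heq] at h2
        rw [pvJoin_cons_cons, h2, hac]
        simp
    · rw [pvSplitCh, if_neg hac, ih (a :: cur)]
      simp

theorem pvJoin_eq_nil (c : Char) (l : List (List Char)) (h : PySem.Chars.join [c] l = []) :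
    l = [] ∨ l = [[]] := by
  rcases l with _ | ⟨p, _ | ⟨q, r⟩⟩
  · exact Or.inl rfl
  · rw [pvJoin_singleton] at h; simp [h]
  · rw [pvJoin_cons_cons] at h; simp at h

-- split a char list at the first occurrence of c
theorem pvSplitAtSep (c : Char) : ∀ (a b s1 s2 : List Char), c ∉ a → c ∉ b →
    (s1 = [] ∨ ∃ u, s1 = c :: u) → (s2 = [] ∨ ∃ u, s2 = c :: u) →
    a ++ s1 = b ++ s2 → a = b ∧ s1 = s2 := by
  intro a
  induction a with
  | nil =>
    intro b s1 s2 _ hb hs1 hs2 heq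
    simp only [List.nil_append] at heq
    rcases b with _ | ⟨y, b'⟩
    · simp only [List.nil_append] at heq
      exact ⟨rfl, heq⟩
    · exfalso
      rcases hs1 with h | ⟨u, h⟩ <;> subst h
      · simp at heq
      · simp only [List.cons_append, List.cons.injEq] at heq
        exact hb (List.mem_cons.mpr (Or.inl heq.1))
  | cons x a' ih =>
    intro b s1 s2 ha hb hs1 hs2 heq
    rcases b with _ | ⟨y, b'⟩
    · exfalso
      simp only [List.nil_append, List.cons_append] at heq
      rcases hs2 with h | ⟨u, h⟩ <;> subst h
      · simp at heq
      · simp only [List.cons.injEq] at heq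
        exact ha (List.mem_cons.mpr (Or.inl heq.1.symm))
    · simp only [List.cons_append, List.cons.injEq] at heq
      obtain ⟨hxy, htail⟩ := heq
      obtain ⟨h1, h2⟩ := ih b' s1 s2 (fun hh => ha (List.mem_cons_of_mem _ hh))
        (fun hh => hb (List.mem_cons_of_mem _ hh)) hs1 hs2 htail
      exact ⟨by rw [hxy, h1], h2⟩

theorem pvJoin_inj (c : Char) : ∀ (l1 l2 : List (List Char)), l1 ≠ [] → l2 ≠ [] →
    (∀ p ∈ l1, c ∉ p) → (∀ p ∈ l2, c ∉ p) →
    PySem.Chars.join [c] l1 = PySem.Chars.join [c] l2 → l1 = l2 := by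
  intro l1
  induction l1 with
  | nil => intro l2 h; exact absurd rfl h
  | cons p1 r1 ih =>
    intro l2 _ hl2 hm1 hm2 hj
    rcases l2 with _ | ⟨p2, r2⟩
    · exact absurd rfl hl2
    · have step : p1 = p2 ∧ (match r1 with | [] => ([] : List Char) | _ => c :: PySem.Chars.join [c] r1) =
          (match r2 with | [] => ([] : List Char) | _ => c :: PySem.Chars.join [c] r2) := by
        apply pvSplitAtSep c _ _ _ _ (hm1 p1 (by simp)) (hm2 p2 (by simp))
        · rcases r1 with _ | ⟨q, r⟩
          · exact Or.inl rfl
          · exact Or.inr ⟨_, rfl⟩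
        · rcases r2 with _ | ⟨q, r⟩
          · exact Or.inl rfl
          · exact Or.inr ⟨_, rfl⟩
        · rcases r1 with _ | ⟨q1, s1⟩ <;> rcases r2 with _ | ⟨q2, s2⟩ <;>
            simpa [pvJoin_singleton, pvJoin_cons_cons] using hj
      obtain ⟨hp, ht⟩ := step
      rcases r1 with _ | ⟨q1, s1⟩ <;> rcases r2 with _ | ⟨q2, s2⟩
      · simp [hp]
      · simp at ht
      · simp at ht
      · simp only [List.cons.injEq] at ht
        have := ih (q2 :: s2) (by simp) (by simp)
          (fun p hp => hm1 p (List.mem_cons_of_mem _ hp))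
          (fun p hp => hm2 p (List.mem_cons_of_mem _ hp)) ht.2
        simp [hp, this]

-- multiset equality by length + counts over the left list (what Source B's _same_gate checks)
theorem pvPermOfLenCount : ∀ (l1 l2 : List String), l1.length = l2.length →
    (∀ x ∈ l1, l1.count x = l2.count x) → l1.Perm l2 := by
  intro l1
  induction l1 with
  | nil =>
    intro l2 hlen _
    cases l2 with
    | nil => exact List.Perm.refl _
    | cons y t => simp at hlen
  | cons x t ih =>
    intro l2 hlen hcnt
    have hx : x ∈ l2 := by
      have := hcnt x (by simp)
      have hpos : 0 < l2.count x := by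
        rw [← this, List.count_cons_self]; omega
      exact List.count_pos_iff.mp hpos
    have hperm2 : l2.Perm (x :: l2.erase x) := List.perm_cons_erase hx
    have hlen' : t.length = (l2.erase x).length := by
      have h1 := hperm2.length_eq
      simp only [List.length_cons] at h1 hlen
      omega
    have hcnt' : ∀ y ∈ t, t.count y = (l2.erase x).count y := by
      intro y hy
      have hcy := hperm2.count_eq y
      have h0 := hcnt y (by simp [hy])
      simp only [List.count_cons] at h0 hcy
      by_cases hxy : x = y
      · subst hxy
        simp only [beq_self_eq_true, if_pos] at h0 hcy
        omega
      · have hne : (x == y) = false := by simpa using hxy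
        simp only [hne, Bool.false_eq_true, if_false] at h0 hcy
        omega
    exact ((ih (l2.erase x) hlen' hcnt').cons x).trans hperm2.symm

theorem pvSameGate_iff (t1 t2 : String) (c1 c2 : List String) :
    pvSameGate (t1, c1) (t2, c2) = true ↔ t1 = t2 ∧ c1.Perm c2 := by
  unfold pvSameGate
  simp only [Bool.and_eq_true, beq_iff_eq, List.all_eq_true, PySem.List.count_eq]
  constructor
  · rintro ⟨ht, hlen, hcnt⟩
    exact ⟨ht, pvPermOfLenCount c1 c2 hlen (fun x hx => by simpa using hcnt x hx)⟩
  · rintro ⟨ht, hperm⟩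
    exact ⟨ht, hperm.length_eq, fun x _ => by simp [hperm.count_eq x]⟩

-- pvNorm expressed through pvParse (they run the same parsing code)
theorem pvNorm_parse (g : String) :
    pvNorm g = (pvParse g).1 ++ ":" ++
      PySem.Str.join "," (PySem.List.sorted (pvParse g).2 (fun x => x)) := by
  unfold pvNorm pvParse
  dsimp only
  split_ifs with h <;> rfl

-- properties of pvParse's output
theorem pvParse_props (g : String) :
    (':' ∉ (pvParse g).1.toList) ∧ (∀ x ∈ (pvParse g).2, ',' ∉ x.toList) ∧ ((pvParse g).2 ≠ [""]) := by
  unfold pvParse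
  rw [pvSplit_eq g ":" ':' (by decide)]
  rcases hsp : pvSplitCh ':' g.toList [] with _ | ⟨p0, ps⟩
  · exact absurd hsp (pvSplitCh_ne_nil ':' g.toList [])
  dsimp only
  refine ⟨?_, ?_⟩
  · have hp0 : ':' ∉ p0 := pvSplitCh_not_mem ':' g.toList [] (by simp) p0 (by rw [hsp]; simp)
    simpa [PySem.List.pyGetD, PySem.List.pyGet?, PySem.List.pyIdx?] using hp0
  · split_ifs with h
    · set s := PySem.List.pyGetD ((p0 :: ps).map String.ofList) 1 "" with hs
      constructor
      · intro x hx
        rw [pvSplit_eq s "," ',' (by decide)] at hx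
        obtain ⟨p, hp, hpx⟩ := List.mem_map.mp hx
        have := pvSplitCh_not_mem ',' s.toList [] (by simp) p hp
        simpa [← hpx] using this
      · intro hcon
        rw [pvSplit_eq s "," ',' (by decide)] at hcon
        rcases hq : pvSplitCh ',' s.toList [] with _ | ⟨q, qs⟩
        · exact absurd hq (pvSplitCh_ne_nil ',' s.toList [])
        rw [hq] at hcon
        simp only [List.map_cons, List.cons.injEq] at hcon
        have hqs : qs = [] := by
          have := hcon.2
          rcases qs with _ | _
          · rfl
          · simp at this
        have hqnil : q = [] := by
          have := congrArg String.toList hcon.1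
          simpa [String.toList_ofList] using this
        have hrt := pvSplitCh_join ',' s.toList []
        rw [hq, hqs, hqnil] at hrt
        rw [pvJoin_singleton] at hrt
        have hst : s.toList = [] := by simpa using hrt.symm
        exact h.2 (String.toList_inj.mp (by rw [hst]; decide))
    · exact ⟨by simp, by simp⟩

-- the heart: A's normalized-string equality is B's counted multiset equality
theorem pvNorm_eq_iff (g h : String) :
    (pvNorm g = pvNorm h) ↔ pvSameGate (pvParse g) (pvParse h) = true := by
  obtain ⟨hg1, hg2, hg3⟩ := pvParse_props g
  obtain ⟨hh1, hh2, hh3⟩ := pvParse_props h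
  rcases hpg : pvParse g with ⟨t1, c1⟩
  rcases hph : pvParse h with ⟨t2, c2⟩
  rw [hpg] at hg1 hg2 hg3
  rw [hph] at hh1 hh2 hh3
  rw [pvNorm_parse g, pvNorm_parse h, hpg, hph]
  simp only
  rw [pvSameGate_iff]
  rw [← String.toList_inj]
  simp only [String.toList_append, PySem.Str.toList_join]
  have hsep : (":" : String).toList = [':'] := by decide
  have hsep2 : ("," : String).toList = [','] := by decide
  rw [hsep, hsep2]
  set L1 := (PySem.List.sorted c1 (fun x => x)).map String.toList with hL1
  set L2 := (PySem.List.sorted c2 (fun x => x)).map String.toList with hL2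
  have hsplit : (t1.toList ++ ':' :: PySem.Chars.join [','] L1 =
      t2.toList ++ ':' :: PySem.Chars.join [','] L2) ↔
      (t1 = t2 ∧ PySem.Chars.join [','] L1 = PySem.Chars.join [','] L2) := by
    constructor
    · intro heq
      obtain ⟨h1, h2⟩ := pvSplitAtSep ':' t1.toList t2.toList _ _ hg1 hh1
        (Or.inr ⟨_, rfl⟩) (Or.inr ⟨_, rfl⟩) (by simpa using heq)
      exact ⟨String.toList_inj.mp h1, by simpa using h2⟩
    · rintro ⟨h1, h2⟩
      rw [h1, h2]
  rw [List.append_assoc, List.append_assoc, List.singleton_append, List.singleton_append, hsplit]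
  -- now reduce the join equality to the permutation
  have hmem1 : ∀ p ∈ L1, ',' ∉ p := by
    intro p hp
    obtain ⟨x, hx, hxp⟩ := List.mem_map.mp hp
    exact hxp ▸ hg2 x ((PySem.List.mem_sorted c1 (fun x => x) false x).mp hx)
  have hmem2 : ∀ p ∈ L2, ',' ∉ p := by
    intro p hp
    obtain ⟨x, hx, hxp⟩ := List.mem_map.mp hp
    exact hxp ▸ hh2 x ((PySem.List.mem_sorted c2 (fun x => x) false x).mp hx)
  have hne1 : L1 ≠ [[]] := by
    intro hcon
    apply hg3
    have : PySem.List.sorted c1 (fun x => x) = [""] := by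
      rcases hs : PySem.List.sorted c1 (fun x => x) with _ | ⟨q, qs⟩
      · rw [hL1, hs] at hcon; simp at hcon
      · rw [hL1, hs] at hcon
        simp only [List.map_cons, List.cons.injEq] at hcon
        have hqs : qs = [] := by
          rcases qs with _ | _
          · rfl
          · simp at hcon
        rw [hqs]
        have : q = "" := String.toList_inj.mp (by simp [hcon.1])
        rw [this]
    exact List.perm_singleton.mp (this ▸ (PySem.List.sorted_perm c1 (fun x => x) false).symm)
  have hne2 : L2 ≠ [[]] := by
    intro hcon
    apply hh3
    have : PySem.List.sorted c2 (fun x => x) = [""] := by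
      rcases hs : PySem.List.sorted c2 (fun x => x) with _ | ⟨q, qs⟩
      · rw [hL2, hs] at hcon; simp at hcon
      · rw [hL2, hs] at hcon
        simp only [List.map_cons, List.cons.injEq] at hcon
        have hqs : qs = [] := by
          rcases qs with _ | _
          · rfl
          · simp at hcon
        rw [hqs]
        have : q = "" := String.toList_inj.mp (by simp [hcon.1])
        rw [this]
    exact List.perm_singleton.mp (this ▸ (PySem.List.sorted_perm c2 (fun x => x) false).symm)
  have hjoin : PySem.Chars.join [','] L1 = PySem.Chars.join [','] L2 ↔ L1 = L2 := by
    constructor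
    · intro hj
      rcases hL1nil : L1 with _ | ⟨p1, r1⟩
      · rw [hL1nil, pvJoin_nil] at hj
        rcases pvJoin_eq_nil ',' L2 hj.symm with h | h
        · rw [h]
        · exact absurd h hne2
      · rcases hL2nil : L2 with _ | ⟨p2, r2⟩
        · rw [hL2nil, pvJoin_nil] at hj
          rcases pvJoin_eq_nil ',' L1 (by rw [hL1nil] at hj ⊢; exact hj) with h | h
          · rw [hL1nil] at h; simp at h
          · exact absurd (hL1nil ▸ h) hne1
        · rw [← hL1nil, ← hL2nil]
          exact pvJoin_inj ',' L1 L2 (by rw [hL1nil]; simp) (by rw [hL2nil]; simp)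
            hmem1 hmem2 hj
    · intro hj; rw [hj]
  rw [hjoin]
  have hmapinj : L1 = L2 ↔ PySem.List.sorted c1 (fun x => x) = PySem.List.sorted c2 (fun x => x) := by
    constructor
    · intro hl
      exact List.map_injective_iff.mpr (fun a b hab => String.toList_inj.mp hab) (hL1 ▸ hL2 ▸ hl)
    · intro hl; rw [hL1, hL2, hl]
  rw [hmapinj, PySem.List.sorted_id_eq_sorted_id_iff_perm]

-- adjacency scans
def pvAdj (l : List String) : Bool := (l.zip (l.drop 1)).any (fun p => p.1 == p.2)

def pvAdjB (l : List (String × List String)) : Bool := (l.zip (l.drop 1)).any (fun p => pvSameGate p.1 p.2)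

theorem pvAdj_cons_cons (p n : String) (l : List String) :
    pvAdj (p :: n :: l) = ((p == n) || pvAdj (n :: l)) := rfl

theorem pvAdjB_cons_cons (p n : String × List String) (l : List (String × List String)) :
    pvAdjB (p :: n :: l) = (pvSameGate p n || pvAdjB (n :: l)) := rfl

-- loop invariant: A's loop equals the adjacent scan on the (prev ::?) normalized remainder
theorem pvLoopA_eq (segs : List String) :
    ∀ prev : Option String,
      pvLoopA segs prev =
        pvAdj ((prev.toList) ++ (segs.filter (fun s => s != "")).map pvNorm) := by
  induction segs with
  | nil =>
    intro prev
    cases prev <;> rfl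
  | cons g rest ih =>
    intro prev
    by_cases hg : g = ""
    · subst hg
      cases prev <;> simpa [pvLoopA] using ih _
    · have hgf : (g != "") = true := by simpa using hg
      cases prev with
      | none =>
        simp only [pvLoopA, if_neg hg, List.filter_cons, hgf, if_pos trivial]
        rw [if_neg (by simp)]
        simpa using ih (some (pvNorm g))
      | some p =>
        simp only [pvLoopA, if_neg hg, List.filter_cons, hgf, if_pos trivial,
          Option.toList, List.cons_append, List.nil_append, List.map_cons,
          pvAdj_cons_cons]
        by_cases hpn : pvNorm g = p
        · subst hpn
          rw [if_pos ⟨by simp, rfl⟩]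
          simp
        · have hne : (p == pvNorm g) = false := by
            simp only [beq_eq_false_iff_ne]
            exact fun h => hpn h.symm
          rw [if_neg (by simp [Ne, eq_comm]; exact fun h => hpn h.symm)]
          rw [hne, Bool.false_or]
          simpa using ih (some (pvNorm g))

-- the two adjacency scans agree segment list by segment list
theorem pvAdj_eq_pvAdjB (l : List String) :
    pvAdj (l.map pvNorm) = pvAdjB (l.map pvParse) := by
  induction l with
  | nil => rfl
  | cons a rest ih =>
    rcases rest with _ | ⟨b, m⟩
    · rfl
    · simp only [List.map_cons] at ih ⊢
      rw [pvAdj_cons_cons, pvAdjB_cons_cons, ih]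
      congr 1
      by_cases hn : pvNorm a = pvNorm b
      · have := (pvNorm_eq_iff a b).mp hn
        simp [hn, this]
      · have : pvSameGate (pvParse a) (pvParse b) ≠ true := fun hc => hn ((pvNorm_eq_iff a b).mpr hc)
        simp [hn, Bool.eq_false_iff.mpr this]

-- ===== VERDICT (by name: the statement is the Claim_ definition above) =====
theorem has_reducible_pairs_spec : Claim_equal_has_reducible_pairs := by
  intro gates_text _
  unfold Spec_has_reducible_pairs has_reducible_pairs has_reducible_pairs_alt
  by_cases h : gates_text = ""
  · subst h; rfl
  · rw [if_neg h, pvLoopA_eq _ none]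
    exact pvAdj_eq_pvAdjB _
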